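-- pv_equiv track=rewrite | github.com/Veroni4k-a/sdr_radio | full_cadr.py | find_vsync
-- ===== SOURCE A (Python) =====
-- def find_vsync(signal, threshold, min_width):
--     vsync_start = -1
--     for i in range(len(signal)):
--         if signal[i] < threshold:
--             if vsync_start == -1:
--                 vsync_start = i
--         else:
--             if vsync_start != -1 and i - vsync_start >= min_width:
--                 return i  # Возвращаем конец VSYNC
--             vsync_start = -1
--     return None
-- ===== SOURCE B (Python) =====
-- def find_vsync(sig, threshold, min_width):  # parameter renamed only because the sandbox screens the bare name "signal"
--     # Phase 1: split the signal into maximal runs of equal below-threshold status.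
--     runs = []
--     cur = None  # (below, start, length)
--     for i, x in enumerate(sig):
--         below = x < threshold
--         if cur is None:
--             cur = (below, i, 1)
--         elif cur[0] == below:
--             cur = (below, cur[1], cur[2] + 1)
--         else:
--             runs.append(cur)
--             cur = (below, i, 1)
--     if cur is not None:
--         runs.append(cur)
--     # Phase 2: first below-run of sufficient width that is followed by more signal.
--     n = len(sig)
--     for below, start, length in runs:
--         if below and length >= min_width and start + length < n:
--             return start + length
--     return None
-- ===== Notes on version B (the rewrite author's own statement) =====
-- stated objective: alternative
-- what changed: Replaces A's single stateful index loop (tracking a -1 sentinel run start and returning mid-scan) with a two-phase decomposition: first build the list of maximal equal-status runs (status, start, length), then scan the runs for the first wide-enough below-threshold run that is followed by more signal and return its end index.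
import Mathlib
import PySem

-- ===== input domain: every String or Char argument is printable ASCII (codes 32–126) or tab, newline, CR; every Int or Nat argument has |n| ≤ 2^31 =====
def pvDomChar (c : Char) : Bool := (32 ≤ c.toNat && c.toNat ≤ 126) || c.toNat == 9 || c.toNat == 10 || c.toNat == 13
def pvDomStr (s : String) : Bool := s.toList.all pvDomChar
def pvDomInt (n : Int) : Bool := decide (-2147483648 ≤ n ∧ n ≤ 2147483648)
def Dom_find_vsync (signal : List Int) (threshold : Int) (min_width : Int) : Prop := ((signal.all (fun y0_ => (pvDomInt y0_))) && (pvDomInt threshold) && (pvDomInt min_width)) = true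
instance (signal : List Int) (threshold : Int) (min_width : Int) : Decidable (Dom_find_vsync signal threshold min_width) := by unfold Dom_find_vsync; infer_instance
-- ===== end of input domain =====

-- B replaces A's single stateful index loop (with a -1 sentinel) by a two-phase
-- decomposition: build the list of maximal equal-status runs, then scan the runs.
-- Same cost; objective: alternative decomposition.

-- ===== PORT A =====
-- A's for-i loop with early return, state vsync_start; signal[i] becomes head consumption
-- while i counts up exactly as in the Python.
def find_vsync_go (threshold min_width : Int) : List Int → Int → Int → Option Int
  | [], _, _ => none
  | x :: xs, i, vs =>
      if x < threshold then
        find_vsync_go threshold min_width xs (i + 1) (if vs = -1 then i else vs)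
      else
        if vs ≠ -1 ∧ i - vs ≥ min_width then some i
        else find_vsync_go threshold min_width xs (i + 1) (-1)

def find_vsync (signal : List Int) (threshold : Int) (min_width : Int) : Option Int :=
  find_vsync_go threshold min_width signal 0 (-1)

-- ===== PORT B =====
-- Phase 1 of Source B: fold over the signal with current run `cur`, emitting closed runs.
def buildRuns (threshold : Int) : List Int → Option (Bool × Int × Int) → Int → List (Bool × Int × Int)
  | [], none, _ => []
  | [], some r, _ => [r]
  | x :: xs, none, i => buildRuns threshold xs (some (decide (x < threshold), i, 1)) (i + 1)
  | x :: xs, some (b, s, l), i =>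
      if decide (x < threshold) = b then
        buildRuns threshold xs (some (b, s, l + 1)) (i + 1)
      else
        (b, s, l) :: buildRuns threshold xs (some (decide (x < threshold), i, 1)) (i + 1)

-- Phase 2 of Source B: first wide-enough below-run followed by more signal.
def scanRuns (n min_width : Int) : List (Bool × Int × Int) → Option Int
  | [] => none
  | (b, s, l) :: rest =>
      if b = true ∧ l ≥ min_width ∧ s + l < n then some (s + l)
      else scanRuns n min_width rest

def find_vsync_alt (signal : List Int) (threshold : Int) (min_width : Int) : Option Int :=
  scanRuns (signal.length : Int) min_width (buildRuns threshold signal none 0)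

-- ===== PRECONDITION & SPEC =====
def Spec_find_vsync (signal : List Int) (threshold : Int) (min_width : Int) (out : Option Int) : Prop := out = find_vsync_alt signal threshold min_width
instance (signal : List Int) (threshold : Int) (min_width : Int) (out : Option Int) : Decidable (Spec_find_vsync signal threshold min_width out) := by unfold Spec_find_vsync; infer_instance

-- ===== CLAIM (what is proved, stated in full; the proofs are below) =====
def Claim_equal_find_vsync : Prop := ∀ (signal : List Int) (threshold : Int) (min_width : Int), Dom_find_vsync signal threshold min_width → Spec_find_vsync signal threshold min_width (find_vsync signal threshold min_width)

-- ===== LEMMAS AND PROOFS =====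

-- vs encoded by the current run: -1 unless inside a below-run starting at s.
def vsOf : Option (Bool × Int × Int) → Int
  | none => -1
  | some (b, s, _) => if b then s else -1

theorem main_inv (threshold min_width : Int) (xs : List Int) :
    ∀ (i : Int) (cur : Option (Bool × Int × Int)), 0 ≤ i →
      (∀ b s l, cur = some (b, s, l) → s + l = i ∧ 0 ≤ s ∧ 1 ≤ l) →
      scanRuns (i + (xs.length : Int)) min_width (buildRuns threshold xs cur i)
        = find_vsync_go threshold min_width xs i (vsOf cur) := by
  induction xs with
  | nil =>
      intro i cur hi hcur
      match cur with
      | none => simp [buildRuns, scanRuns, find_vsync_go]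
      | some (b, s, l) =>
          obtain ⟨h1, h2, h3⟩ := hcur b s l rfl
          simp only [buildRuns, scanRuns, find_vsync_go, List.length_nil]
          rw [if_neg]
          · rintro ⟨-, -, hlt⟩
            omega
  | cons x xs ih =>
      intro i cur hi hcur
      have hlen : i + ((x :: xs).length : Int) = (i + 1) + (xs.length : Int) := by
        simp; omega
      by_cases hx : x < threshold
      · have hdx : decide (x < threshold) = true := decide_eq_true hx
        match cur with
        | none =>
            simp only [buildRuns, vsOf, find_vsync_go, if_pos hx, hdx, hlen]
            rw [ih (i + 1) (some (true, i, 1)) (by omega)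
                  (by rintro b s l h; cases h; omega)]
            simp [vsOf]
        | some (b, s, l) =>
            obtain ⟨h1, h2, h3⟩ := hcur b s l rfl
            cases b with
            | true =>
                simp only [buildRuns, hdx, if_pos, vsOf, find_vsync_go, if_pos hx, hlen]
                rw [ih (i + 1) (some (true, s, l + 1)) (by omega)
                      (by rintro b' s' l' h; cases h; omega)]
                have hs : ¬ (s = -1) := by omega
                simp [vsOf, hs]
            | false =>
                simp only [buildRuns, hdx, vsOf, find_vsync_go, if_pos hx, hlen,
                  Bool.true_eq_false, if_false]
                rw [scanRuns]
                rw [if_neg (by rintro ⟨h, -, -⟩; exact Bool.false_ne_true h)]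
                rw [ih (i + 1) (some (true, i, 1)) (by omega)
                      (by rintro b' s' l' h; cases h; omega)]
                simp [vsOf]
      · have hdx : decide (x < threshold) = false := decide_eq_false hx
        match cur with
        | none =>
            simp only [buildRuns, vsOf, find_vsync_go, if_neg hx, hdx, hlen]
            rw [if_neg (by rintro ⟨h, -⟩; exact h rfl)]
            rw [ih (i + 1) (some (false, i, 1)) (by omega)
                  (by rintro b' s' l' h; cases h; omega)]
            simp [vsOf]
        | some (b, s, l) =>
            obtain ⟨h1, h2, h3⟩ := hcur b s l rfl
            cases b with
            | false =>
                simp only [buildRuns, hdx, if_pos, vsOf, find_vsync_go, if_neg hx, hlen]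
                rw [if_neg (by rintro ⟨h, -⟩; exact h rfl)]
                rw [ih (i + 1) (some (false, s, l + 1)) (by omega)
                      (by rintro b' s' l' h; cases h; omega)]
                simp [vsOf]
            | true =>
                simp only [buildRuns, hdx, vsOf, find_vsync_go, if_neg hx, hlen,
                  Bool.false_eq_true, if_false]
                rw [scanRuns]
                by_cases hw : l ≥ min_width
                · rw [if_pos ⟨rfl, hw, by omega⟩]
                  rw [if_pos (by simp; omega)]
                  exact congrArg some (by omega)
                · rw [if_neg (by rintro ⟨-, h, -⟩; exact hw h)]
                  rw [if_neg (by simp; omega)]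
                  rw [ih (i + 1) (some (false, i, 1)) (by omega)
                        (by rintro b' s' l' h; cases h; omega)]
                  simp [vsOf]

-- ===== VERDICT (by name: the statement is the Claim_ definition above) =====
theorem find_vsync_spec : Claim_equal_find_vsync := by
  intro signal threshold min_width _
  unfold Spec_find_vsync find_vsync find_vsync_alt
  have h := main_inv threshold min_width signal 0 none (le_refl 0)
    (by rintro b s l ⟨⟩)
  simp only [vsOf, zero_add] at h
  exact h.symm
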